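-- pv_equiv track=rewrite | github.com/avalan-ai/avalan | src/avalan/cli/theme/fancy.py | _symmetric_indices
-- ===== SOURCE A (Python) =====
-- def _symmetric_indices(data: list[float]) -> list[int]:
--     """Sort data desc so that highest values in center lower at edge."""
--     assert data
--     sorted_data = sorted(data, reverse=True)
--     n = len(sorted_data)
--     result: list[int | None] = [None] * n
--
--     left = n // 2 - 1
--     right = n // 2
--
--     for i, _ in enumerate(sorted_data):
--         if i % 2 == 0:
--             result[left] = i
--             left -= 1
--         else:
--             result[right] = i
--             right += 1
--     return [r for r in result if r is not None]
-- ===== SOURCE B (Python) =====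
-- def _symmetric_indices(data: list[float]) -> list[int]:
--     """Closed form: even indices descending into the left half, odd indices
--     ascending into the right half, plus the last index at the far right when
--     the length is odd."""
--     n = len(data)
--     h = n // 2
--     result = [2 * k for k in range(h - 1, -1, -1)] + [2 * k + 1 for k in range(h)]
--     if n % 2:
--         result.append(n - 1)
--     return result
-- ===== Notes on version B (the rewrite author's own statement) =====
-- stated objective: simpler
-- what changed: Replaces the alternating two-pointer walk over a None-filled buffer (with negative-index wraparound on odd lengths) by a direct closed-form construction: even indices descending, odd indices ascending, last index appended when the length is odd; the dead sorted() call is dropped since the result depends only on len(data).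
import Mathlib
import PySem

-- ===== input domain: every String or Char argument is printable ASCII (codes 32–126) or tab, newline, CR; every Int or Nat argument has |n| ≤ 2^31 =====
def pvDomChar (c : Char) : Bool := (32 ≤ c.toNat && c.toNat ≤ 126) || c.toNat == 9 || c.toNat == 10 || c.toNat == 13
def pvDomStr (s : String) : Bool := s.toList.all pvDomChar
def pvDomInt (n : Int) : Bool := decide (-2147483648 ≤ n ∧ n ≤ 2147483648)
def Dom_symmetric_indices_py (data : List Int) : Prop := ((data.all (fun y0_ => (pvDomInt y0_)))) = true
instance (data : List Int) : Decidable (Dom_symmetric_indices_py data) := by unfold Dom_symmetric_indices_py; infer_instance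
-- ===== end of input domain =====

-- B computes the same permutation in closed form instead of simulating A's
-- alternating two-pointer walk; equal return values are proved on nonempty lists
-- (A asserts on the empty list).

-- ===== PORT A =====
-- result[i] = v with Python's negative-index wraparound; exact whenever the
-- effective index is in range, which holds on every input Pre_ admits.
def pySetIdx (xs : List (Option Int)) (i : Int) (v : Int) : List (Option Int) :=
  let j : Int := if i < 0 then i + xs.length else i
  xs.set j.toNat (some v)

-- the loop body of A (state: result, left, right; i the enumerate index);
-- Lean's `i % 2` coincides with Python's `i % 2` since the divisor 2 is positive
def aStep (st : List (Option Int) × Int × Int) (i : Int) : List (Option Int) × Int × Int :=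
  if i % 2 == 0 then (pySetIdx st.1 st.2.1 i, st.2.1 - 1, st.2.2)
  else (pySetIdx st.1 st.2.2 i, st.2.1, st.2.2 + 1)

def symmetric_indices_py (data : List Int) : List Int :=
  let sorted_data := PySem.List.sorted data (fun x => x) true
  let n : Int := sorted_data.length
  let result : List (Option Int) := List.replicate n.toNat none
  let st := (PySem.List.enumerate sorted_data 0).foldl
      (fun st p => aStep st p.1)
      (result, PySem.Int.floordiv n 2 - 1, PySem.Int.floordiv n 2)
  st.1.filterMap id

-- ===== PORT B =====
def symmetric_indices_py_alt (data : List Int) : List Int :=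
  let n : Int := data.length
  let h : Int := PySem.Int.floordiv n 2
  let result : List Int :=
    (PySem.List.pyRange (h - 1) (-1) (-1)).map (fun k => 2 * k) ++
    (PySem.List.pyRange 0 h 1).map (fun k => 2 * k + 1)
  if PySem.Int.mod n 2 != 0 then result ++ [n - 1] else result

-- ===== PRECONDITION & SPEC =====
-- Pre_ excludes only the empty list, on which A's `assert data` raises AssertionError.
def Pre_symmetric_indices_py (data : List Int) : Prop := data ≠ []
instance (data : List Int) : Decidable (Pre_symmetric_indices_py data) := by unfold Pre_symmetric_indices_py; infer_instance
def pvWitness_symmetric_indices_py : List Int := [3, 1, 2]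

def Spec_symmetric_indices_py (data : List Int) (out : List Int) : Prop := out = symmetric_indices_py_alt data
instance (data : List Int) (out : List Int) : Decidable (Spec_symmetric_indices_py data out) := by unfold Spec_symmetric_indices_py; infer_instance

-- ===== CLAIM (what is proved, stated in full; the proofs are below) =====
def Claim_equal_symmetric_indices_py : Prop := ∀ (data : List Int), Dom_symmetric_indices_py data → Pre_symmetric_indices_py data → Spec_symmetric_indices_py data (symmetric_indices_py data)

-- ===== LEMMAS AND PROOFS =====

-- the Option-valued contents of A's buffer: evens grow at the front, odds at the back
def evensBuf : Nat → List (Option Int)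
  | 0 => []
  | e + 1 => some (2 * (e : Int)) :: evensBuf e

def oddsBuf : Nat → List (Option Int)
  | 0 => []
  | o + 1 => oddsBuf o ++ [some (2 * (o : Int) + 1)]

theorem length_evensBuf (e : Nat) : (evensBuf e).length = e := by
  induction e with
  | zero => rfl
  | succ e ih => simp [evensBuf, ih]

theorem length_oddsBuf (o : Nat) : (oddsBuf o).length = o := by
  induction o with
  | zero => rfl
  | succ o ih => simp [oddsBuf, ih]

theorem set_replicate_last {α : Type} (m : Nat) (a b : α) :
    (List.replicate (m + 1) a).set m b = List.replicate m a ++ [b] := by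
  rw [List.replicate_succ', List.set_append]
  simp

theorem inv_lemma (n h : Nat) (hh : 2 * h ≤ n) :
    ∀ k : Nat, k ≤ 2 * h →
    (PySem.List.pyRange 0 (k : Int) 1).foldl aStep
        (List.replicate n none, (h : Int) - 1, (h : Int)) =
    (List.replicate (h - (k + 1) / 2) none ++ evensBuf ((k + 1) / 2) ++ oddsBuf (k / 2) ++
        List.replicate (n - h - k / 2) none,
     (h : Int) - 1 - (((k + 1) / 2 : Nat) : Int), (h : Int) + ((k / 2 : Nat) : Int)) := by
  intro k
  induction k with
  | zero =>
      intro _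
      rw [PySem.List.pyRange_one_eq_nil (by omega)]
      simp only [List.foldl_nil, Nat.zero_div, Nat.sub_zero, evensBuf, oddsBuf,
        List.append_nil, Nat.cast_zero]
      rw [show h - 1 / 2 = h by omega, ← List.replicate_add, show h + (n - h) = n by omega]
      norm_num
  | succ k ih =>
      intro hk1
      have hk : k ≤ 2 * h := by omega
      rw [show ((k + 1 : Nat) : Int) = (k : Int) + 1 by push_cast; ring,
        PySem.List.pyRange_one_succ_right (by omega), List.foldl_append, ih hk]
      simp only [List.foldl_cons, List.foldl_nil]
      rcases Nat.even_or_odd k with ⟨t, rfl⟩ | ⟨t, rfl⟩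
      · -- k = t + t, even step: write index t+t at position h-1-t
        have ht : t < h := by omega
        have hc : ((t + t : Nat) : Int) % 2 = 0 := by omega
        rw [show (t + t + 1) / 2 = t by omega, show (t + t) / 2 = t by omega]
        simp only [aStep, hc, beq_iff_eq, if_pos]
        simp only [pySetIdx]
        rw [if_neg (by omega)]
        have hjt : ((h : Int) - 1 - ((t : Nat) : Int)).toNat = h - 1 - t := by omega
        simp only [hjt]
        rw [List.set_append, if_pos (by simp [List.length_replicate, length_evensBuf]; omega)]
        rw [List.set_append, if_pos (by simp [List.length_replicate, length_evensBuf]; omega)]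
        rw [List.set_append, if_pos (by simp [List.length_replicate]; omega)]
        rw [show h - t = (h - 1 - t) + 1 by omega, set_replicate_last]
        rw [show (t + t + 1 + 1) / 2 = t + 1 by omega]
        simp only [Prod.mk.injEq]
        refine ⟨?_, by push_cast; ring, trivial⟩
        rw [show h - (t + 1) = h - 1 - t by omega,
          show evensBuf (t + 1) = some (2 * (t : Int)) :: evensBuf t from rfl,
          show ((t + t : Nat) : Int) = 2 * (t : Int) by push_cast; ring]
        simp [List.append_assoc]
      · -- k = 2t + 1, odd step: write index 2t+1 at position h+t
        have ht : t + 1 ≤ h := by omega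
        have hb : 1 ≤ n - h - t := by omega
        have hc : ¬ (((2 * t + 1 : Nat) : Int) % 2 = 0) := by omega
        rw [show (2 * t + 1 + 1) / 2 = t + 1 by omega, show (2 * t + 1) / 2 = t by omega]
        simp only [aStep, beq_iff_eq, if_neg hc]
        simp only [pySetIdx]
        rw [if_neg (by omega)]
        have hjt : ((h : Int) + ((t : Nat) : Int)).toNat = h + t := by omega
        simp only [hjt]
        rw [List.set_append, if_neg (by simp [List.length_replicate, length_evensBuf, length_oddsBuf]; omega)]
        simp only [List.length_append, List.length_replicate, length_evensBuf, length_oddsBuf]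
        rw [show h + t - (h - (t + 1) + (t + 1) + t) = 0 by omega]
        rw [show n - h - t = (n - h - (t + 1)) + 1 by omega, List.replicate_succ,
          List.set_cons_zero]
        rw [show (2 * t + 1 + 1 + 1) / 2 = t + 1 by omega]
        simp only [Prod.mk.injEq]
        refine ⟨?_, trivial, by push_cast; ring⟩
        rw [show oddsBuf (t + 1) = oddsBuf t ++ [some (2 * (t : Int) + 1)] from rfl,
          show ((2 * t + 1 : Nat) : Int) = 2 * (t : Int) + 1 by push_cast; ring]
        simp [List.append_assoc]

theorem filterMap_evensBuf (e : Nat) :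
    (evensBuf e).filterMap id =
      (PySem.List.pyRange ((e : Int) - 1) (-1) (-1)).map (fun k => 2 * k) := by
  induction e with
  | zero => rw [PySem.List.pyRange_neg_one_eq_nil (by omega)]; rfl
  | succ e ih =>
      rw [show ((e + 1 : Nat) : Int) - 1 = (e : Int) by push_cast; ring,
        PySem.List.pyRange_neg_one_cons (by omega)]
      simp [evensBuf]
      simpa using ih

theorem filterMap_oddsBuf (o : Nat) :
    (oddsBuf o).filterMap id =
      (PySem.List.pyRange 0 (o : Int) 1).map (fun k => 2 * k + 1) := by
  induction o with
  | zero => rw [PySem.List.pyRange_one_eq_nil (by omega)]; rfl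
  | succ o ih =>
      rw [show ((o + 1 : Nat) : Int) = (o : Int) + 1 by push_cast; ring,
        PySem.List.pyRange_one_succ_right (by omega)]
      simp [oddsBuf]
      simpa using ih

theorem foldl_enum (xs : List Int) (init : List (Option Int) × Int × Int) :
    (PySem.List.enumerate xs).foldl (fun st p => aStep st p.1) init =
      (PySem.List.pyRange 0 (xs.length : Int) 1).foldl aStep init := by
  rw [PySem.List.enumerate_eq_map_pyRange xs 0, List.foldl_map]
  simp

theorem main_eq (data : List Int) :
    symmetric_indices_py data = symmetric_indices_py_alt data := by
  unfold symmetric_indices_py symmetric_indices_py_alt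
  simp only [PySem.List.length_sorted, Int.toNat_natCast]
  rw [foldl_enum]
  simp only [PySem.List.length_sorted]
  rcases Nat.even_or_odd data.length with ⟨h, hL⟩ | ⟨h, hL⟩
  · -- even length: the loop fills the buffer completely
    rw [hL]
    rw [show PySem.Int.floordiv ((h + h : Nat) : Int) 2 = (h : Int) by
      rw [PySem.Int.floordiv_eq_ediv_of_pos (by norm_num)]; push_cast; omega]
    rw [inv_lemma (h + h) h (by omega) (h + h) (by omega)]
    rw [show (h + h + 1) / 2 = h by omega, show (h + h) / 2 = h by omega,
      show h - h = 0 from by omega, show h + h - h - h = 0 from by omega]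
    simp only [List.replicate_zero, List.nil_append, List.append_nil,
      List.filterMap_append, filterMap_evensBuf, filterMap_oddsBuf]
    rw [show PySem.Int.mod ((h + h : Nat) : Int) 2 = 0 by
      rw [PySem.Int.mod_eq_emod_of_pos (by norm_num)]; push_cast; omega]
    simp
  · -- odd length: last iteration wraps around to the final slot
    rw [hL]
    rw [show PySem.Int.floordiv ((2 * h + 1 : Nat) : Int) 2 = (h : Int) by
      rw [PySem.Int.floordiv_eq_ediv_of_pos (by norm_num)]; push_cast; omega]
    rw [show ((2 * h + 1 : Nat) : Int) = ((2 * h : Nat) : Int) + 1 by push_cast; ring,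
      PySem.List.pyRange_one_succ_right (by omega), List.foldl_append]
    rw [inv_lemma (2 * h + 1) h (by omega) (2 * h) (by omega)]
    rw [show (2 * h + 1) / 2 = h by omega, show (2 * h) / 2 = h by omega,
      show h - h = 0 from by omega, show 2 * h + 1 - h - h = 1 from by omega]
    simp only [List.foldl_cons, List.foldl_nil, aStep, pySetIdx,
      List.replicate_zero, List.nil_append]
    rw [if_pos (by simp)]
    simp only [List.length_append, List.length_replicate, length_evensBuf, length_oddsBuf]
    rw [if_pos (by omega)]
    rw [show ((h : Int) - 1 - (h : Int) + ((h + h + 1 : Nat) : Int)).toNat = 2 * h by omega]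
    rw [List.set_append, if_neg (by simp [length_evensBuf, length_oddsBuf]; omega)]
    simp only [List.length_append, length_evensBuf, length_oddsBuf]
    rw [show 2 * h - (h + h) = 0 by omega]
    rw [show (List.replicate 1 (none : Option Int)) = [none] from rfl, List.set_cons_zero]
    simp only [List.filterMap_append, filterMap_evensBuf, filterMap_oddsBuf]
    rw [show PySem.Int.mod (((2 * h : Nat) : Int) + 1) 2 = 1 by
      rw [PySem.Int.mod_eq_emod_of_pos (by norm_num)]; omega]
    simp

-- ===== VERDICT (by name: the statement is the Claim_ definition above) =====
theorem symmetric_indices_py_spec : Claim_equal_symmetric_indices_py := by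
  intro data _ _
  unfold Spec_symmetric_indices_py
  exact main_eq data
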